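-- pv_equiv track=rewrite | github.com/uustortoise/Beta_6 | backend/elderlycare_v1_16/profile/validator.py | check_condition_medication_alignment
-- ===== SOURCE A (Python) =====
-- from typing import Dict, List, Any, Optional, Tuple
--
-- def check_condition_medication_alignment(
--     conditions: List[str],
--     medications: List[Dict[str, Any]]
-- ) -> List[str]:
--     """
--     Check if medications align with reported conditions.
--
--     Args:
--         conditions: List of medical conditions
--         medications: List of medications
--
--     Returns:
--         List of alignment warnings
--     """
--     warnings = []
--
--     # Map conditions to expected medication classes (simplified)
--     condition_med_map = {
--         'Hypertension': ['ace', 'arb', 'beta', 'calcium', 'diuretic'],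
--         'Diabetes Type 1': ['insulin'],
--         'Diabetes Type 2': ['metformin', 'glipizide', 'insulin'],
--         'COPD': ['bronchodilator', 'steroid'],
--         'Asthma': ['bronchodilator', 'steroid'],
--     }
--
--     medication_names = [med.get('name', '').lower() for med in medications]
--
--     for condition in conditions:
--         expected_classes = condition_med_map.get(condition, [])
--         if expected_classes:
--             has_expected = any(
--                 any(cls in med_name for cls in expected_classes)
--                 for med_name in medication_names
--             )
--             if not has_expected:
--                 warnings.append(f"⚠️ No typical medications for condition: {condition}")
--
--     return warnings
-- ===== SOURCE B (Python) =====
-- def check_condition_medication_alignment(conditions, medications):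
--     condition_med_map = {
--         'Hypertension': ['ace', 'arb', 'beta', 'calcium', 'diuretic'],
--         'Diabetes Type 1': ['insulin'],
--         'Diabetes Type 2': ['metformin', 'glipizide', 'insulin'],
--         'COPD': ['bronchodilator', 'steroid'],
--         'Asthma': ['bronchodilator', 'steroid'],
--     }
--     # union of all expected classes, then one pass over medications builds
--     # the set of classes that actually occur in some medication name
--     all_classes = set()
--     for classes in condition_med_map.values():
--         all_classes.update(classes)
--     present = set()
--     for med in medications:
--         name = med.get('name', '').lower()
--         for cls in all_classes:
--             if cls in name:
--                 present.add(cls)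
--     warnings = []
--     for condition in conditions:
--         expected = condition_med_map.get(condition, [])
--         if expected and not any(cls in present for cls in expected):
--             warnings.append(f"⚠️ No typical medications for condition: {condition}")
--     return warnings
-- ===== Notes on version B (the rewrite author's own statement) =====
-- stated objective: alternative
-- what changed: B first builds, in one pass over the medications, the set of medication classes present as substrings of some name, then checks each condition against that set by membership, instead of A's per-condition rescan of all medication names.
import Mathlib
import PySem

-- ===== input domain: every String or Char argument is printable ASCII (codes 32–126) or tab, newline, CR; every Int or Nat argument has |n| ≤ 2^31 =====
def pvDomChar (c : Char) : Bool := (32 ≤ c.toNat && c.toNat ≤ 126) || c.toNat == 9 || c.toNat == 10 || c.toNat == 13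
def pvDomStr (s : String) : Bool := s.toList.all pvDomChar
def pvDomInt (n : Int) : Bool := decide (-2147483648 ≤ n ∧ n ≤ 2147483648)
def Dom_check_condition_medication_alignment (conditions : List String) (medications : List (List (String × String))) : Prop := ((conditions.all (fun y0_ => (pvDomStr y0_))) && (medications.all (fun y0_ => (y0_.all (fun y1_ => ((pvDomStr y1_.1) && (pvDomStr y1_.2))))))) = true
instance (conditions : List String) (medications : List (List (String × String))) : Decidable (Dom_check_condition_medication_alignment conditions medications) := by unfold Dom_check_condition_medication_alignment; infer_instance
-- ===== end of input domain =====

-- B builds the set of medication classes present in some name once, then checks each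
-- condition by set membership (alternative structure; A rescans all names per condition).


-- the fixed condition → expected-classes map, shared data of both programs
def pvCondMap : PySem.Dict String (List String) := PySem.Dict.mk
  [("Hypertension", ["ace", "arb", "beta", "calcium", "diuretic"]),
   ("Diabetes Type 1", ["insulin"]),
   ("Diabetes Type 2", ["metformin", "glipizide", "insulin"]),
   ("COPD", ["bronchodilator", "steroid"]),
   ("Asthma", ["bronchodilator", "steroid"])]

-- med.get('name', '').lower()
def pvLowerName (med : List (String × String)) : String :=
  PySem.Str.lower ((PySem.Dict.mk med).getD "name" "")

-- ===== PORT A =====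
def check_condition_medication_alignment (conditions : List String) (medications : List (List (String × String))) : List String :=
  let medication_names := medications.map pvLowerName
  conditions.foldl (fun warnings condition =>
    let expected_classes := pvCondMap.getD condition []
    if expected_classes ≠ [] then
      let has_expected := medication_names.any (fun med_name =>
        expected_classes.any (fun cls => PySem.Str.isIn cls med_name))
      if ¬ has_expected = true then
        warnings ++ ["⚠️ No typical medications for condition: " ++ condition]
      else warnings
    else warnings) []

-- ===== PORT B =====
-- all_classes = set(); for classes in map.values(): all_classes.update(classes)
def pvAllClasses : PySem.Set String :=
  pvCondMap.values.foldl (fun s classes => PySem.Set.update s classes) PySem.Set.empty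

def check_condition_medication_alignment_alt (conditions : List String) (medications : List (List (String × String))) : List String :=
  let present := medications.foldl (fun p med =>
      let name := pvLowerName med
      pvAllClasses.foldl (fun p cls => if PySem.Str.isIn cls name then PySem.Set.add p cls else p) p)
    PySem.Set.empty
  conditions.foldl (fun warnings condition =>
    let expected := pvCondMap.getD condition []
    if expected ≠ [] ∧ ¬ expected.any (fun cls => PySem.Set.contains present cls) = true then
      warnings ++ ["⚠️ No typical medications for condition: " ++ condition]
    else warnings) []

-- ===== PRECONDITION & SPEC =====
def Spec_check_condition_medication_alignment (conditions : List String) (medications : List (List (String × String))) (out : List String) : Prop := out = check_condition_medication_alignment_alt conditions medications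
instance (conditions : List String) (medications : List (List (String × String))) (out : List String) : Decidable (Spec_check_condition_medication_alignment conditions medications out) := by unfold Spec_check_condition_medication_alignment; infer_instance

-- ===== CLAIM (what is proved, stated in full; the proofs are below) =====
def Claim_equal_check_condition_medication_alignment : Prop := ∀ (conditions : List String) (medications : List (List (String × String))), Dom_check_condition_medication_alignment conditions medications → Spec_check_condition_medication_alignment conditions medications (check_condition_medication_alignment conditions medications)

-- ===== LEMMAS AND PROOFS =====

-- membership after the inner filter-into-set loop of B
theorem pv_mem_inner (L : List String) (p : PySem.Set String) (name x : String) :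
    x ∈ L.foldl (fun p cls => if PySem.Str.isIn cls name then PySem.Set.add p cls else p) p ↔
    x ∈ p ∨ (x ∈ L ∧ PySem.Str.isIn x name = true) := by
  induction L generalizing p with
  | nil => simp
  | cons c rest ih =>
    rw [List.foldl_cons]
    by_cases h : PySem.Str.isIn c name = true
    · rw [if_pos h, ih]
      simp only [PySem.Set.mem_add, List.mem_cons]
      constructor
      · rintro ((h2 | rfl) | ⟨h3, h4⟩)
        · exact Or.inl h2
        · exact Or.inr ⟨Or.inl rfl, h⟩
        · exact Or.inr ⟨Or.inr h3, h4⟩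
      · rintro (h2 | ⟨rfl | h3, h4⟩)
        · exact Or.inl (Or.inl h2)
        · exact Or.inl (Or.inr rfl)
        · exact Or.inr ⟨h3, h4⟩
    · rw [if_neg h, ih]
      simp only [List.mem_cons]
      constructor
      · rintro (h2 | ⟨h3, h4⟩)
        · exact Or.inl h2
        · exact Or.inr ⟨Or.inr h3, h4⟩
      · rintro (h2 | ⟨rfl | h3, h4⟩)
        · exact Or.inl h2
        · exact absurd h4 h
        · exact Or.inr ⟨h3, h4⟩

-- membership in B's 'present' set
theorem pv_mem_present (medications : List (List (String × String))) (p : PySem.Set String) (x : String) :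
    x ∈ medications.foldl (fun p med =>
        pvAllClasses.foldl (fun p cls => if PySem.Str.isIn cls (pvLowerName med) then PySem.Set.add p cls else p) p) p ↔
    x ∈ p ∨ (x ∈ pvAllClasses ∧ ∃ med ∈ medications, PySem.Str.isIn x (pvLowerName med) = true) := by
  induction medications generalizing p with
  | nil => simp
  | cons m rest ih =>
    simp only [List.foldl_cons, ih, pv_mem_inner, List.mem_cons]
    constructor
    · rintro ((h | ⟨h1, h2⟩) | ⟨h1, med, h2, h3⟩)
      · exact Or.inl h
      · exact Or.inr ⟨h1, m, Or.inl rfl, h2⟩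
      · exact Or.inr ⟨h1, med, Or.inr h2, h3⟩
    · rintro (h | ⟨h1, med, (rfl | h2), h3⟩)
      · exact Or.inl (Or.inl h)
      · exact Or.inl (Or.inr ⟨h1, h3⟩)
      · exact Or.inr ⟨h1, med, h2, h3⟩

-- every class a condition can expect is in the union pvAllClasses
theorem pv_expected_sub (c x : String) (h : x ∈ pvCondMap.getD c []) : x ∈ pvAllClasses := by
  simp only [pvCondMap, PySem.Dict.getD_eq_get?_getD, PySem.Dict.get?_mk_cons] at h
  split_ifs at h <;> (try simp only [Option.getD_some, List.mem_cons, List.not_mem_nil, or_false] at h) <;>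
    rcases h with rfl | rfl | rfl | rfl | rfl <;> decide

-- the per-condition steps of A and B agree
theorem pv_step (medications : List (List (String × String))) (warnings : List String) (condition : String) :
    (let expected_classes := pvCondMap.getD condition []
     if expected_classes ≠ [] then
       let has_expected := (medications.map pvLowerName).any (fun med_name =>
         expected_classes.any (fun cls => PySem.Str.isIn cls med_name))
       if ¬ has_expected = true then
         warnings ++ ["⚠️ No typical medications for condition: " ++ condition]
       else warnings
     else warnings) =
    (let present := medications.foldl (fun p med =>
        pvAllClasses.foldl (fun p cls => if PySem.Str.isIn cls (pvLowerName med) then PySem.Set.add p cls else p) p)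
      PySem.Set.empty
     let expected := pvCondMap.getD condition []
     if expected ≠ [] ∧ ¬ expected.any (fun cls => PySem.Set.contains present cls) = true then
       warnings ++ ["⚠️ No typical medications for condition: " ++ condition]
     else warnings) := by
  simp only []
  have hiff : ((medications.map pvLowerName).any (fun med_name =>
      (pvCondMap.getD condition []).any (fun cls => PySem.Str.isIn cls med_name)) = true) ↔
      ((pvCondMap.getD condition []).any (fun cls =>
        PySem.Set.contains (medications.foldl (fun p med =>
          pvAllClasses.foldl (fun p cls => if PySem.Str.isIn cls (pvLowerName med) then PySem.Set.add p cls else p) p)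
          PySem.Set.empty) cls) = true) := by
    simp only [List.any_eq_true, List.mem_map, PySem.Set.contains_iff, pv_mem_present,
      PySem.Set.empty, List.not_mem_nil, false_or]
    constructor
    · rintro ⟨_, ⟨med, hm, rfl⟩, cls, hc, hin⟩
      exact ⟨cls, hc, pv_expected_sub _ _ hc, med, hm, hin⟩
    · rintro ⟨cls, hc, _, med, hm, hin⟩
      exact ⟨pvLowerName med, ⟨med, hm, rfl⟩, cls, hc, hin⟩
  by_cases he : pvCondMap.getD condition [] = []
  · rw [if_neg (by simp [he]), if_neg (by simp [he])]
  · by_cases hh : ((medications.map pvLowerName).any (fun med_name =>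
        (pvCondMap.getD condition []).any (fun cls => PySem.Str.isIn cls med_name)) = true)
    · rw [if_pos (by simp [he]), if_neg (not_not_intro hh), if_neg (fun hc => hc.2 (hiff.mp hh))]
    · rw [if_pos (by simp [he]), if_pos hh, if_pos ⟨by simp [he], fun hb => hh (hiff.mpr hb)⟩]

-- ===== VERDICT (by name: the statement is the Claim_ definition above) =====
theorem check_condition_medication_alignment_spec : Claim_equal_check_condition_medication_alignment := by
  intro conditions medications hD
  clear hD
  unfold Spec_check_condition_medication_alignment
  unfold check_condition_medication_alignment check_condition_medication_alignment_alt
  dsimp only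
  induction conditions using List.reverseRecOn with
  | nil => rfl
  | append_singleton rest c ih =>
    rw [List.foldl_append, List.foldl_append, ih]
    simp only [List.foldl_cons, List.foldl_nil]
    exact pv_step medications _ c
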